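-- pv_equiv track=rewrite | github.com/sairohitp/problem-solving | CodeChef/non-negative-product/non-negative-product.py | min_elements_to_remove
-- ===== SOURCE A (Python) =====
-- def min_elements_to_remove(n, arr):
--     negative_count = 0
--     zero_count = 0
--     for num in arr:
--         if num < 0:
--             negative_count += 1
--         elif num == 0:
--             zero_count += 1
--     if negative_count % 2 == 0:
--         return 0
--     elif zero_count > 0:
--         return 0
--     else:
--         return 1
-- ===== SOURCE B (Python) =====
-- def min_elements_to_remove(n, arr):
--     p = 1
--     for num in arr:
--         p *= num
--     return 1 if p < 0 else 0
-- ===== Notes on version B (the rewrite author's own statement) =====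
-- stated objective: alternative
-- what changed: B forms the running product of the elements and returns 1 exactly when it is negative, instead of counting negatives and zeros and checking parity like A.
import Mathlib
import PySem

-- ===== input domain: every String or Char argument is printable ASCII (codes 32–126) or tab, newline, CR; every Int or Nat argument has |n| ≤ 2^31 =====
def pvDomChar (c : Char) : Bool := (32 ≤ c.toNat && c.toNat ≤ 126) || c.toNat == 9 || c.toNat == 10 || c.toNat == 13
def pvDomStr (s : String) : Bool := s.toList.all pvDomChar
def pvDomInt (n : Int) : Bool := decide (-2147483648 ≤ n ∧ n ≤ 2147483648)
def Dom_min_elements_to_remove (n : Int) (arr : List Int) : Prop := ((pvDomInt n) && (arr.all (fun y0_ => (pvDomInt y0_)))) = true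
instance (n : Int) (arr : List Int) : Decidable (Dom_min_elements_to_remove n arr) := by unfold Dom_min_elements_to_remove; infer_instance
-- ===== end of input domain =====

-- B replaces A's negative/zero counting and parity test by a running product whose sign decides the answer (alternative decomposition, same cost).

-- ===== PORT A =====
def min_elements_to_remove (n : Int) (arr : List Int) : Int :=
  let c := arr.foldl (fun (s : Int × Int) num =>
      if num < 0 then (s.1 + 1, s.2)
      else if num = 0 then (s.1, s.2 + 1)
      else s) (0, 0)
  if c.1 % 2 = 0 then 0
  else if c.2 > 0 then 0
  else 1

-- ===== PORT B =====
def min_elements_to_remove_alt (n : Int) (arr : List Int) : Int :=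
  let p := arr.foldl (fun (p : Int) num => p * num) 1
  if p < 0 then 1 else 0

-- ===== PRECONDITION & SPEC =====
def Spec_min_elements_to_remove (n : Int) (arr : List Int) (out : Int) : Prop := out = min_elements_to_remove_alt n arr
instance (n : Int) (arr : List Int) (out : Int) : Decidable (Spec_min_elements_to_remove n arr out) := by unfold Spec_min_elements_to_remove; infer_instance

-- ===== CLAIM (what is proved, stated in full; the proofs are below) =====
def Claim_equal_min_elements_to_remove : Prop := ∀ (n : Int) (arr : List Int), Dom_min_elements_to_remove n arr → Spec_min_elements_to_remove n arr (min_elements_to_remove n arr)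

-- ===== LEMMAS AND PROOFS =====

-- A's counting loop computes the two countP's, shifted by the accumulator.
theorem pvCountLoop (arr : List Int) (nc zc : Int) :
    arr.foldl (fun (s : Int × Int) num =>
      if num < 0 then (s.1 + 1, s.2)
      else if num = 0 then (s.1, s.2 + 1)
      else s) (nc, zc)
    = (nc + (arr.countP (fun x => decide (x < 0)) : Int),
       zc + (arr.countP (fun x => decide (x = 0)) : Int)) := by
  induction arr generalizing nc zc with
  | nil => simp
  | cons x xs ih =>
      by_cases hx : x < 0
      · simp [List.countP_cons, hx, ih]
        omega
      · by_cases hz : x = 0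
        · simp [List.countP_cons, hx, hz, ih]
          omega
        · simp [hx, hz, ih]

-- Sign of the running product: negative iff no factor is zero and the
-- accumulator's sign disagrees with the parity of the negative factors.
theorem pvProdSign (arr : List Int) (a : Int) :
    (arr.foldl (fun (p : Int) num => p * num) a < 0)
    ↔ ((∀ x ∈ arr, x ≠ 0) ∧
        ((a < 0 ∧ arr.countP (fun x => decide (x < 0)) % 2 = 0) ∨
         (0 < a ∧ arr.countP (fun x => decide (x < 0)) % 2 = 1))) := by
  induction arr generalizing a with
  | nil => simp
  | cons x xs ih =>
      simp only [List.foldl_cons, ih (a * x), List.countP_cons, List.mem_cons]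
      by_cases hx : x < 0
      · constructor
        · rintro ⟨hz, h⟩
          refine ⟨fun y hy => by rcases hy with rfl | hy; omega; exact hz y hy, ?_⟩
          rcases h with ⟨hax, hp⟩ | ⟨hax, hp⟩
          · right
            constructor
            · nlinarith
            · simp only [hx, decide_true, if_true] at hp ⊢; omega
          · left
            constructor
            · nlinarith
            · simp only [hx, decide_true, if_true] at hp ⊢; omega
        · rintro ⟨hz, h⟩
          refine ⟨fun y hy => hz y (Or.inr hy), ?_⟩
          rcases h with ⟨hax, hp⟩ | ⟨hax, hp⟩
          · right
            constructor
            · nlinarith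
            · simp only [hx, decide_true, if_true] at hp ⊢; omega
          · left
            constructor
            · nlinarith
            · simp only [hx, decide_true, if_true] at hp ⊢; omega
      · by_cases hz0 : x = 0
        · subst hz0
          simp
        · have hxpos : 0 < x := by omega
          simp only [hx, decide_false]
          constructor
          · rintro ⟨hz, h⟩
            refine ⟨fun y hy => by rcases hy with rfl | hy; exact hz0; exact hz y hy, ?_⟩
            rcases h with ⟨hax, hp⟩ | ⟨hax, hp⟩
            · exact Or.inl ⟨by nlinarith, by simpa using hp⟩
            · exact Or.inr ⟨by nlinarith, by simpa using hp⟩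
          · rintro ⟨hz, h⟩
            refine ⟨fun y hy => hz y (Or.inr hy), ?_⟩
            rcases h with ⟨hax, hp⟩ | ⟨hax, hp⟩
            · exact Or.inl ⟨by nlinarith, by simpa using hp⟩
            · exact Or.inr ⟨by nlinarith, by simpa using hp⟩

-- ===== VERDICT (by name: the statement is the Claim_ definition above) =====
theorem min_elements_to_remove_spec : Claim_equal_min_elements_to_remove := by
  intro n arr _
  show min_elements_to_remove n arr = min_elements_to_remove_alt n arr
  unfold min_elements_to_remove min_elements_to_remove_alt
  simp only [pvCountLoop, pvProdSign]
  have hz : (arr.countP (fun x => decide (x = 0)) = 0) ↔ ∀ x ∈ arr, x ≠ 0 := by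
    simp [List.countP_eq_zero]
  have hzc : 0 ≤ (arr.countP (fun x => decide (x = 0)) : Int) := by positivity
  split_ifs with h1 h2 h3 <;> (try rename_i h) <;> simp_all
  · omega
  · rcases h with ⟨hall, _⟩; exact (hall 0 h3) rfl
  · have := h (fun x hx hx0 => h3 (hx0 ▸ hx)); omega
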